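-- pv_equiv track=rewrite | github.com/vegetable123q/lca-skills | process-automated-builder/scripts/md/list_product_flow_category_children.py | _build_children
-- ===== SOURCE A (Python) =====
-- from collections import defaultdict
--
-- def _build_children(rows: list[tuple[int, str, str]]) -> dict[str | None, list[tuple[str, str]]]:
--     children: dict[str | None, list[tuple[str, str]]] = defaultdict(list)
--     stack: list[tuple[int, str]] = []
--     for level, code, text in rows:
--         while stack and stack[-1][0] >= level:
--             stack.pop()
--         parent_code = stack[-1][1] if stack else None
--         children[parent_code].append((code, text))
--         stack.append((level, code))
--     return children
-- ===== SOURCE B (Python) =====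
-- from collections import defaultdict
--
-- def _build_children(rows: list[tuple[int, str, str]]) -> dict[str | None, list[tuple[str, str]]]:
--     # Parent-pointer jumping: each row records its parent's INDEX; the parent of a new
--     # row is found by following ancestor links from the previous row (nearest earlier
--     # row with a strictly smaller level), with no stack maintained or popped.
--     children: dict[str | None, list[tuple[str, str]]] = defaultdict(list)
--     parent_idx: list[int] = []
--     for level, code, text in rows:
--         j = len(parent_idx) - 1
--         while j != -1 and rows[j][0] >= level:
--             j = parent_idx[j]
--         parent_idx.append(j)
--         children[rows[j][1] if j != -1 else None].append((code, text))
--     return children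
-- ===== Notes on version B (the rewrite author's own statement) =====
-- stated objective: alternative
-- what changed: Replaces the explicit pop-while stack with per-row parent-index pointers: each row's parent is found by jumping along ancestor links from the previous row, so no stack is built, popped or consulted.
import Mathlib
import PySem

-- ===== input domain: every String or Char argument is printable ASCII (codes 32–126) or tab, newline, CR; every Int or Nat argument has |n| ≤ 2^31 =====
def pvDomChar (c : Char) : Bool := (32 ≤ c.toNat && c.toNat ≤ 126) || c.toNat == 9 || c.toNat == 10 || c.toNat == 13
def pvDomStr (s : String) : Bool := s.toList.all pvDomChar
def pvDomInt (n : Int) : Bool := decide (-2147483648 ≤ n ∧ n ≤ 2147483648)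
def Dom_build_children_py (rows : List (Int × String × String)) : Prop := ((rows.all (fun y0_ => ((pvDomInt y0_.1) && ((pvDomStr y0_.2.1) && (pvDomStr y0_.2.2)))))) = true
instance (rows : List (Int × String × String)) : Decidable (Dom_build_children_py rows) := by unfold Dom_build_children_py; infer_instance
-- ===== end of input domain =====

-- B replaces A's pop-while stack by per-row parent-index pointer jumping; same return value, no speed claim.


-- ===== PORT A =====
-- 'while stack and stack[-1][0] >= level: stack.pop()'; the stack is kept top-at-head.
def popGE (s : List (Int × String)) (level : Int) : List (Int × String) :=
  match s with
  | [] => []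
  | p :: rest => if level ≤ p.1 then popGE rest level else p :: rest

-- one iteration of A's for-loop over (children, stack)
def aStep (st : PySem.Dict (Option String) (List (String × String)) × List (Int × String))
    (r : Int × String × String) :
    PySem.Dict (Option String) (List (String × String)) × List (Int × String) :=
  let s' := popGE st.2 r.1
  let parent := s'.head?.map Prod.snd
  -- children[parent].append((code, text)) on a defaultdict(list)
  (st.1.modify parent [] (fun v => v ++ [(r.2.1, r.2.2)]), (r.1, r.2.1) :: s')

def build_children_py (rows : List (Int × String × String)) : List (Option String × List (String × String)) :=
  (rows.foldl aStep (PySem.Dict.empty, [])).1.items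

-- ===== PORT B =====
-- 'while j != -1 and rows[j][0] >= level: j = parent_idx[j]'.
-- The inner '-1 ≤ nxt ∧ nxt < j' test is a pure totality guard: parent_idx entries are
-- always ≥ -1 and smaller than their own index, so it holds on every reachable state.
def jumpB (rows : List (Int × String × String)) (pidx : List Int) (level : Int) (j : Int) : Int :=
  if j ≠ -1 ∧ level ≤ (rows.getD j.toNat (0, "", "")).1 then
    let nxt := pidx.getD j.toNat (-1)
    if -1 ≤ nxt ∧ nxt < j then jumpB rows pidx level nxt else j
  else j
termination_by (j + 1).toNat
decreasing_by omega

-- one iteration of B's for-loop over (children, parent_idx)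
def bStep (rows : List (Int × String × String))
    (st : PySem.Dict (Option String) (List (String × String)) × List Int)
    (r : Int × String × String) :
    PySem.Dict (Option String) (List (String × String)) × List Int :=
  let j := jumpB rows st.2 r.1 ((st.2.length : Int) - 1)
  let parent := if j ≠ -1 then some ((rows.getD j.toNat (0, "", "")).2.1) else none
  (st.1.modify parent [] (fun v => v ++ [(r.2.1, r.2.2)]), st.2 ++ [j])

def build_children_py_alt (rows : List (Int × String × String)) : List (Option String × List (String × String)) :=
  (rows.foldl (bStep rows) (PySem.Dict.empty, [])).1.items

-- ===== PRECONDITION & SPEC =====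
def Spec_build_children_py (rows : List (Int × String × String)) (out : List (Option String × List (String × String))) : Prop := out = build_children_py_alt rows
instance (rows : List (Int × String × String)) (out : List (Option String × List (String × String))) : Decidable (Spec_build_children_py rows out) := by unfold Spec_build_children_py; infer_instance

-- ===== CLAIM (what is proved, stated in full; the proofs are below) =====
def Claim_equal_build_children_py : Prop := ∀ (rows : List (Int × String × String)), Dom_build_children_py rows → Spec_build_children_py rows (build_children_py rows)

-- ===== LEMMAS AND PROOFS =====

-- well-formedness of B's parent-index list: every entry is ≥ -1 and below its own index
def pvWF (pidx : List Int) : Prop :=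
  ∀ k (h : k < pidx.length), -1 ≤ pidx[k] ∧ pidx[k] < (k : Int)

-- A's stack reconstructed from B's parent pointers: the ancestor chain of index j
def chainOf (rows : List (Int × String × String)) (pidx : List Int) (j : Int) :
    List (Int × String) :=
  if j = -1 then []
  else
    let r := rows.getD j.toNat (0, "", "")
    let nxt := pidx.getD j.toNat (-1)
    (r.1, r.2.1) :: (if -1 ≤ nxt ∧ nxt < j then chainOf rows pidx nxt else [])
termination_by (j + 1).toNat
decreasing_by omega

theorem popGE_cons (p : Int × String) (rest : List (Int × String)) (lv : Int) :
    popGE (p :: rest) lv = if lv ≤ p.1 then popGE rest lv else p :: rest := rfl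

theorem chainOf_cons (rows : List (Int × String × String)) (pidx : List Int) {j : Int}
    (hneg : j ≠ -1) :
    chainOf rows pidx j =
      ((rows.getD j.toNat (0, "", "")).1, (rows.getD j.toNat (0, "", "")).2.1) ::
        (if -1 ≤ pidx.getD j.toNat (-1) ∧ pidx.getD j.toNat (-1) < j then
          chainOf rows pidx (pidx.getD j.toNat (-1)) else []) := by
  rw [chainOf]
  simp [hneg]

theorem popGE_chain (rows : List (Int × String × String)) (pidx : List Int) (lv : Int)
    (hwf : pvWF pidx) :
    ∀ n (j : Int), (j + 1).toNat ≤ n → -1 ≤ j → j < (pidx.length : Int) →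
      popGE (chainOf rows pidx j) lv = chainOf rows pidx (jumpB rows pidx lv j) ∧
      -1 ≤ jumpB rows pidx lv j ∧ jumpB rows pidx lv j ≤ j := by
  intro n
  induction n with
  | zero =>
    intro j hn hj _
    have : j = -1 := by omega
    subst this
    simp [chainOf, jumpB, popGE]
  | succ n ih =>
    intro j hn hj hlen
    by_cases hneg : j = -1
    · subst hneg; simp [chainOf, jumpB, popGE]
    · have hj0 : 0 ≤ j := by omega
      have hjn : j.toNat < pidx.length := by omega
      have hget : pidx.getD j.toNat (-1) = pidx[j.toNat] := by
        simp [List.getD_eq_getElem?_getD, List.getElem?_eq_getElem hjn]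
      obtain ⟨hnx1, hnx2⟩ := hwf j.toNat hjn
      have hguard : -1 ≤ pidx.getD j.toNat (-1) ∧ pidx.getD j.toNat (-1) < j := by
        rw [hget]; exact ⟨hnx1, by omega⟩
      have hch := chainOf_cons rows pidx hneg
      by_cases hlv : lv ≤ (rows.getD j.toNat (0, "", "")).1
      · -- pop / jump
        have hjmp : jumpB rows pidx lv j = jumpB rows pidx lv (pidx.getD j.toNat (-1)) := by
          rw [jumpB, if_pos (And.intro hneg hlv)]
          show (if -1 ≤ pidx.getD j.toNat (-1) ∧ pidx.getD j.toNat (-1) < j then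
              jumpB rows pidx lv (pidx.getD j.toNat (-1)) else j) = _
          rw [if_pos hguard]
        have hrec := ih (pidx.getD j.toNat (-1)) (by omega) hguard.1 (by omega)
        refine ⟨?_, by omega, by omega⟩
        rw [hch, popGE_cons, if_pos hlv, if_pos hguard, hjmp]
        exact hrec.1
      · -- keep / stop
        have hjmp : jumpB rows pidx lv j = j := by
          rw [jumpB, if_neg (by intro h; exact hlv h.2)]
        refine ⟨?_, by omega, by omega⟩
        rw [hjmp, hch, popGE_cons, if_neg hlv, ← hch]

theorem chainOf_append (rows : List (Int × String × String)) (pidx : List Int) (x : Int)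
    (hwf : pvWF pidx) :
    ∀ n (j : Int), (j + 1).toNat ≤ n → -1 ≤ j → j < (pidx.length : Int) →
      chainOf rows (pidx ++ [x]) j = chainOf rows pidx j := by
  intro n
  induction n with
  | zero =>
    intro j hn hj _
    have : j = -1 := by omega
    subst this
    simp [chainOf]
  | succ n ih =>
    intro j hn hj hlen
    by_cases hneg : j = -1
    · subst hneg; simp [chainOf]
    · have hjn : j.toNat < pidx.length := by omega
      have hget : (pidx ++ [x]).getD j.toNat (-1) = pidx.getD j.toNat (-1) := by
        simp [List.getD_eq_getElem?_getD, List.getElem?_append_left hjn]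
      have hget2 : pidx.getD j.toNat (-1) = pidx[j.toNat] := by
        simp [List.getD_eq_getElem?_getD, List.getElem?_eq_getElem hjn]
      obtain ⟨hnx1, hnx2⟩ := hwf j.toNat hjn
      rw [chainOf_cons rows (pidx ++ [x]) hneg, chainOf_cons rows pidx hneg, hget]
      by_cases hguard : -1 ≤ pidx.getD j.toNat (-1) ∧ pidx.getD j.toNat (-1) < j
      · rw [if_pos hguard, if_pos hguard, ih _ (by omega) hguard.1 (by omega)]
      · rw [if_neg hguard, if_neg hguard]

theorem main_fold (rows : List (Int × String × String)) :
    ∀ (suf : List (Int × String × String)) (i : ℕ)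
      (d : PySem.Dict (Option String) (List (String × String))) (pidx : List Int),
      rows.drop i = suf → pidx.length = i → pvWF pidx →
      (suf.foldl aStep (d, chainOf rows pidx ((i : Int) - 1))).1 =
      (suf.foldl (bStep rows) (d, pidx)).1 := by
  intro suf
  induction suf with
  | nil => intro i d pidx _ _ _; rfl
  | cons r rest ih =>
    intro i d pidx hdrop hlen hwf
    have hi : i < rows.length := by
      by_contra h
      rw [List.drop_eq_nil_iff.mpr (by omega)] at hdrop
      simp at hdrop
    have hri : rows[i]? = some r := by
      rw [← List.head?_drop, hdrop, List.head?_cons]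
    have hdrop' : rows.drop (i + 1) = rest := by
      have : rows.drop (i + 1) = (rows.drop i).drop 1 := by
        rw [List.drop_drop]
      simpa [hdrop] using this
    have hgetr : rows.getD i (0, "", "") = r := by
      simp [List.getD_eq_getElem?_getD, hri]
    -- the jump from index i-1 and what it computes
    set j := jumpB rows pidx r.1 ((i : Int) - 1) with hjdef
    clear_value j
    have hpc := popGE_chain rows pidx r.1 hwf ((i : Int) - 1 + 1).toNat ((i : Int) - 1)
      (le_refl _) (by omega) (by omega)
    obtain ⟨hpop, hjlo, hjhi⟩ := hpc
    rw [← hjdef] at hpop hjlo hjhi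
    -- both sides compute the same parent code
    have hparent : (popGE (chainOf rows pidx ((i : Int) - 1)) r.1).head?.map Prod.snd =
        (if j ≠ -1 then some ((rows.getD j.toNat (0, "", "")).2.1) else none) := by
      rw [hpop]
      by_cases hneg : j = -1
      · subst hneg; simp [chainOf]
      · rw [chainOf]; simp [hneg]
    -- the new parent-index list is well-formed
    have hwf' : pvWF (pidx ++ [j]) := by
      intro k hk
      simp only [List.length_append, List.length_cons, List.length_nil] at hk
      by_cases hklt : k < pidx.length
      · rw [List.getElem_append_left hklt]; exact hwf k hklt
      · have hkeq : k = pidx.length := by omega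
        subst hkeq
        rw [List.getElem_append_right (le_refl _)]
        simp only [Nat.sub_self, List.getElem_cons_zero]
        constructor
        · exact hjlo
        · omega
    -- the new stack is the ancestor chain of index i in the extended parent-index list
    have hstack : (r.1, r.2.1) :: popGE (chainOf rows pidx ((i : Int) - 1)) r.1 =
        chainOf rows (pidx ++ [j]) ((i : Int)) := by
      have hne : ((i : Int)) ≠ -1 := by omega
      rw [chainOf_cons rows (pidx ++ [j]) hne]
      have hlast : (pidx ++ [j]).getD ((i : Int)).toNat (-1) = j := by
        have : ((i : Int)).toNat = pidx.length := by omega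
        rw [this]
        simp [List.getD_eq_getElem?_getD]
      have hgr : rows.getD ((i : Int)).toNat (0, "", "") = r := by
        have : ((i : Int)).toNat = i := by omega
        rw [this, hgetr]
      rw [hlast, hgr]
      have hguard : -1 ≤ j ∧ j < (i : Int) := ⟨hjlo, by omega⟩
      rw [if_pos hguard, hpop]
      by_cases hneg : j = -1
      · subst hneg; simp [chainOf]
      · congr 1
        exact (chainOf_append rows pidx j hwf (j + 1).toNat j (le_refl _) hjlo (by omega)).symm
    -- one step on each side, then the induction hypothesis
    simp only [List.foldl_cons, aStep, bStep]
    rw [hparent]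
    have hlen' : ((pidx.length : Int) - 1) = ((i : Int) - 1) := by omega
    rw [hlen', ← hjdef]
    have hcast : ((i : Int) + 1 - 1) = (i : Int) := by omega
    have := ih (i + 1)
      (d.modify (if j ≠ -1 then some ((rows.getD j.toNat (0, "", "")).2.1) else none) []
        (fun v => v ++ [(r.2.1, r.2.2)]))
      (pidx ++ [j]) hdrop' (by simp [hlen]) hwf'
    push_cast at this
    rw [show ((i : Int) + 1 - 1) = (i : Int) from by omega] at this
    rw [hstack]
    exact this

-- ===== VERDICT (by name: the statement is the Claim_ definition above) =====
theorem build_children_py_spec : Claim_equal_build_children_py := by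
  intro rows _
  show build_children_py rows = build_children_py_alt rows
  unfold build_children_py build_children_py_alt
  have := main_fold rows rows 0 PySem.Dict.empty [] (by simp) rfl (by intro k h; simp at h)
  simp only [Nat.cast_zero] at this
  rw [show ((0 : Int) - 1) = -1 by omega] at this
  rw [show chainOf rows [] (-1) = [] by rw [chainOf]; simp] at this
  rw [this]
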